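-- pv_equiv track=rewrite | github.com/98Fabiha/CSE551.1-Minimal-Subgraph-Mining-Project | sudaR2.py | find_minimal_unique_subsets
-- ===== SOURCE A (Python) =====
-- from itertools import combinations
--
-- def find_minimal_unique_subsets(unique_genes):
--     """
--     Calculate minimal unique subsets for each cancer type.
--
--     Parameters:
--         unique_genes (dict): A dictionary of unique genes per cancer type.
--
--     Returns:
--         dict: A dictionary mapping each cancer type to its minimal unique subsets.
--     """
--     minimal_subsets = {}
--
--     for cancer, genes in unique_genes.items():
--         if not genes:
--             minimal_subsets[cancer] = []  # No unique genes
--             continue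
--
--         gene_list = list(genes)
--         minimal_set = []
--
--         # Check all combinations of genes
--         for size in range(1, len(gene_list) + 1):
--             for subset in combinations(gene_list, size):
--                 subset_set = set(subset)
--
--                 # Check if this subset uniquely identifies the cancer type
--                 if all(
--                     subset_set.isdisjoint(other)  # The subset must not be shared with other cancers
--                     for other in minimal_set
--                 ):
--                     minimal_set.append(subset_set)
--
--         minimal_subsets[cancer] = minimal_set  # Store all valid minimal subsets
--
--     return minimal_subsets
-- ===== SOURCE B (Python) =====
-- def find_minimal_unique_subsets(unique_genes):
--     """The minimal unique subsets A computes are exactly the singletons of the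
--     distinct genes in first-occurrence order: every size-1 subset of a fresh
--     gene is kept, and any larger subset shares a gene with one of those
--     singletons, so it is never added."""
--     return {cancer: [{g} for g in dict.fromkeys(genes)]
--             for cancer, genes in unique_genes.items()}
-- ===== Notes on version B (the rewrite author's own statement) =====
-- stated objective: faster
-- what changed: Replaced the exponential scan of all gene combinations with a direct construction: the kept subsets are provably exactly the singletons of the distinct genes in first-occurrence order, so B builds them in one dedup pass per cancer.
import Mathlib
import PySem

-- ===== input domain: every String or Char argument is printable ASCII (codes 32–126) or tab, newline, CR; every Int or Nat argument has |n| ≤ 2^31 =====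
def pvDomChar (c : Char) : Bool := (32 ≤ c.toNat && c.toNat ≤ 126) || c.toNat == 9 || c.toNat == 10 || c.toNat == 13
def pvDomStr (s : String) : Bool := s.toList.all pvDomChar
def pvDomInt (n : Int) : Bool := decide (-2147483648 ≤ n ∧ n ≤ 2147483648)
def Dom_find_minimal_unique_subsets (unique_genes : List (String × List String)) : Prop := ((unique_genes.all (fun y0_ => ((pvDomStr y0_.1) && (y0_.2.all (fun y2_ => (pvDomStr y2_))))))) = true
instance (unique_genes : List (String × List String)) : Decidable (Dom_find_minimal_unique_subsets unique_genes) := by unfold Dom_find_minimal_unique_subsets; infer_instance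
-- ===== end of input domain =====

-- B replaces A's exponential scan of all gene combinations by one dedup pass per
-- cancer (the kept subsets are exactly the singletons of the distinct genes).

-- ===== PORT A =====
-- itertools.combinations(xs, k) in Python's order
def pvCombos (k : Nat) (xs : List String) : List (List String) :=
  match k, xs with
  | 0, _ => [[]]
  | _ + 1, [] => []
  | k + 1, x :: rest => (pvCombos k rest).map (fun s => x :: s) ++ pvCombos (k + 1) rest

-- the body of A's inner loop: append subset_set if disjoint from every kept set
def pvStep (ms : List (PySem.Set String)) (subset : List String) : List (PySem.Set String) :=
  let subset_set := PySem.Set.ofList subset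
  if ms.all (fun other => PySem.Set.isdisjoint subset_set other) then ms ++ [subset_set] else ms

def find_minimal_unique_subsets (unique_genes : List (String × List String)) : List (String × List (List String)) :=
  unique_genes.foldl (fun minimal_subsets p =>
    if p.2.isEmpty then minimal_subsets ++ [(p.1, [])]
    else
      minimal_subsets ++ [(p.1,
        -- for size in range(1, len(gene_list)+1): for subset in combinations(gene_list, size): …
        (List.range' 1 p.2.length).foldl
          (fun minimal_set size => (pvCombos size p.2).foldl pvStep minimal_set) [])]) []

-- ===== PORT B =====
def find_minimal_unique_subsets_alt (unique_genes : List (String × List String)) : List (String × List (List String)) :=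
  unique_genes.map (fun p => (p.1, (PySem.List.dedup p.2).map (fun g => [g])))

-- ===== PRECONDITION & SPEC =====
def Spec_find_minimal_unique_subsets (unique_genes : List (String × List String)) (out : List (String × List (List String))) : Prop := out = find_minimal_unique_subsets_alt unique_genes
instance (unique_genes : List (String × List String)) (out : List (String × List (List String))) : Decidable (Spec_find_minimal_unique_subsets unique_genes out) := by unfold Spec_find_minimal_unique_subsets; infer_instance

-- ===== CLAIM (what is proved, stated in full; the proofs are below) =====
def Claim_equal_find_minimal_unique_subsets : Prop := ∀ (unique_genes : List (String × List String)), Dom_find_minimal_unique_subsets unique_genes → Spec_find_minimal_unique_subsets unique_genes (find_minimal_unique_subsets unique_genes)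

-- ===== LEMMAS AND PROOFS =====

-- combinations of size 1 are the singletons, in order
theorem pvCombos_one (xs : List String) : pvCombos 1 xs = xs.map (fun g => [g]) := by
  induction xs with
  | nil => rfl
  | cons x xs ih => simp [pvCombos, ih]

-- every combination of positive size contains an element of the source list
theorem pvCombos_mem (k : Nat) (xs : List String) (sub : List String)
    (h : sub ∈ pvCombos (k + 1) xs) : ∃ g, g ∈ sub ∧ g ∈ xs := by
  induction xs generalizing k sub with
  | nil => simp [pvCombos] at h
  | cons x xs ih =>
    simp only [pvCombos, List.mem_append, List.mem_map] at h
    rcases h with ⟨t, _, rfl⟩ | h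
    · exact ⟨x, by simp⟩
    · obtain ⟨g, hg, hgx⟩ := ih k sub h
      exact ⟨g, hg, by simp [hgx]⟩

-- one step of A's loop on a singleton is Set.add on the underlying element list
theorem pvStep_single (D : List String) (g : String) :
    pvStep (D.map (fun g => [g])) [g] = (PySem.Set.add D g).map (fun g => [g]) := by
  have hof : PySem.Set.ofList [g] = [g] := rfl
  by_cases h : g ∈ D
  · have : (D.map (fun g => [g])).all
        (fun other => PySem.Set.isdisjoint (PySem.Set.ofList [g]) other) = false := by
      rw [List.all_eq_false]
      exact ⟨[g], List.mem_map_of_mem h, by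
        simp [hof, PySem.Set.isdisjoint_iff] ⟩
    simp [pvStep, this, PySem.Set.add_of_mem h]
  · simp [pvStep, hof, PySem.Set.add_of_not_mem, h]

-- the size-1 pass turns the kept sets into the singletons of Set.update D xs
theorem foldl_singles (xs D : List String) :
    (xs.map (fun g => [g])).foldl pvStep (D.map (fun g => [g])) =
      (PySem.Set.update D xs).map (fun g => [g]) := by
  induction xs generalizing D with
  | nil => rfl
  | cons x xs ih =>
    simp only [List.map_cons, List.foldl_cons, pvStep_single, PySem.Set.update_cons]
    exact ih (PySem.Set.add D x)

-- a subset sharing an element with a kept set is skipped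
theorem pvStep_noop (ms : List (PySem.Set String)) (sub : List String) (g : String)
    (hg : g ∈ sub) (ho : ∃ o ∈ ms, g ∈ o) : pvStep ms sub = ms := by
  obtain ⟨o, hom, hgo⟩ := ho
  have : ms.all (fun other => PySem.Set.isdisjoint (PySem.Set.ofList sub) other) = false := by
    rw [List.all_eq_false]
    refine ⟨o, hom, ?_⟩
    have hd : PySem.Set.isdisjoint (PySem.Set.ofList sub) o = false := by
      cases hcase : PySem.Set.isdisjoint (PySem.Set.ofList sub) o
      · rfl
      · exact absurd hgo (((PySem.Set.isdisjoint_iff _ _).mp hcase g ((PySem.Set.mem_ofList _ _).mpr hg)))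
    simp [hd]
  simp [pvStep, this]

-- a fold whose every step is a no-op is the identity
theorem foldl_id (subs : List (List String)) (ms : List (PySem.Set String))
    (h : ∀ sub ∈ subs, pvStep ms sub = ms) : subs.foldl pvStep ms = ms := by
  induction subs with
  | nil => rfl
  | cons s subs ih =>
    rw [List.foldl_cons, h s (by simp)]
    exact ih (fun t ht => h t (by simp [ht]))

-- once the kept sets are the singletons of all distinct genes, nothing is ever added
theorem foldl_noop (genes : List String) (sizes : List Nat)
    (hs : ∀ s ∈ sizes, 1 ≤ s) :
    sizes.foldl (fun ms size => (pvCombos size genes).foldl pvStep ms)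
      ((PySem.Set.ofList genes).map (fun g => [g])) =
      (PySem.Set.ofList genes).map (fun g => [g]) := by
  induction sizes with
  | nil => rfl
  | cons s sizes ih =>
    have hstep : (pvCombos s genes).foldl pvStep
        ((PySem.Set.ofList genes).map (fun g => [g])) =
        (PySem.Set.ofList genes).map (fun g => [g]) := by
      have h1 : 1 ≤ s := hs s (by simp)
      obtain ⟨k, rfl⟩ : ∃ k, s = k + 1 := ⟨s - 1, by omega⟩
      apply foldl_id
      intro sub hsub
      obtain ⟨g, hgsub, hggenes⟩ := pvCombos_mem k genes sub hsub
      exact pvStep_noop _ sub g hgsub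
        ⟨[g], List.mem_map_of_mem ((PySem.Set.mem_ofList _ _).mpr hggenes), by simp⟩
    rw [List.foldl_cons, hstep]
    exact ih (fun t ht => hs t (by simp [ht]))

theorem inner_eq (genes : List String) (hne : genes ≠ []) :
    (List.range' 1 genes.length).foldl
      (fun ms size => (pvCombos size genes).foldl pvStep ms) [] =
      (PySem.List.dedup genes).map (fun g => [g]) := by
  obtain ⟨m, hm⟩ : ∃ m, genes.length = m + 1 := by
    cases genes with
    | nil => exact absurd rfl hne
    | cons a l => exact ⟨l.length, rfl⟩
  rw [hm, List.range'_succ, List.foldl_cons]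
  have h1 : (pvCombos 1 genes).foldl pvStep [] =
      (PySem.Set.ofList genes).map (fun g => [g]) := by
    have := foldl_singles genes []
    simpa [pvCombos_one, PySem.Set.update_nil_left] using this
  rw [h1]
  have := foldl_noop genes (List.range' 2 m) (by
    intro t ht
    obtain ⟨i, _, rfl⟩ := List.mem_range'.mp ht
    omega)
  rw [this]
  simp

-- ===== VERDICT (by name: the statement is the Claim_ definition above) =====
theorem A_foldl_eq (ug : List (String × List String)) (acc : List (String × List (List String))) :
    ug.foldl (fun minimal_subsets p =>
      if p.2.isEmpty then minimal_subsets ++ [(p.1, [])]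
      else
        minimal_subsets ++ [(p.1,
          (List.range' 1 p.2.length).foldl
            (fun minimal_set size => (pvCombos size p.2).foldl pvStep minimal_set) [])]) acc =
      acc ++ ug.map (fun p => (p.1, (PySem.List.dedup p.2).map (fun g => [g]))) := by
  induction ug generalizing acc with
  | nil => simp
  | cons p ug ih =>
    rw [List.foldl_cons, ih]
    by_cases h : p.2.isEmpty
    · have : p.2 = [] := List.isEmpty_iff.mp h
      simp [this, PySem.List.dedup]
    · have hne : p.2 ≠ [] := by simpa [List.isEmpty_iff] using h
      simp [h, inner_eq p.2 hne]

theorem find_minimal_unique_subsets_spec : Claim_equal_find_minimal_unique_subsets := by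
  intro ug _
  unfold Spec_find_minimal_unique_subsets find_minimal_unique_subsets find_minimal_unique_subsets_alt
  simpa using A_foldl_eq ug []
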